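-- pv_equiv track=rewrite | github.com/Ashvin-Gupta/TextCancEHR | src/pipelines/text_based/feature_ablation_analysis.py | get_medical_events_from_text
-- ===== SOURCE A (Python) =====
-- from typing import List, Dict, Tuple, Optional
--
-- def get_medical_events_from_text(text: str) -> List[Tuple[int, int, str]]:
--     """
--     Extract medical events from text with their positions.
--
--     A medical event is defined as text between semicolons (or sentence boundaries).
--
--     Returns:
--         List of (start_pos, end_pos, event_text) tuples
--     """
--     events = []
--
--     # Split on semicolons which separate events in your EHR text
--     parts = text.split(';')
--     current_pos = 0
--
--     for part in parts:
--         part_stripped = part.strip()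
--         if part_stripped:
--             start = text.find(part_stripped, current_pos)
--             end = start + len(part_stripped)
--             events.append((start, end, part_stripped))
--             current_pos = end
--
--     return events
-- ===== SOURCE B (Python) =====
-- def get_medical_events_from_text(text):
--     """Same extraction in two staged passes over raw indices: first collect the
--     [lo, hi) span of every semicolon-separated segment, then shrink each span past its
--     surrounding whitespace and slice the original text."""
--     # stage 1: raw spans between semicolons
--     spans = []
--     lo = 0
--     for hi, ch in enumerate(text):
--         if ch == ';':
--             spans.append((lo, hi))
--             lo = hi + 1
--     spans.append((lo, len(text)))
--     # stage 2: trim each span and keep the non-empty ones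
--     events = []
--     for lo, hi in spans:
--         while lo < hi and text[lo].isspace():
--             lo += 1
--         while hi > lo and text[hi - 1].isspace():
--             hi -= 1
--         if lo < hi:
--             events.append((lo, hi, text[lo:hi]))
--     return events
-- ===== Notes on version B (the rewrite author's own statement) =====
-- stated objective: alternative
-- what changed: B replaces A's split-strip-find fold by two staged index passes over the raw text: a first pass over enumerate(text) collects the raw span of each semicolon-separated segment, a second pass shrinks every span past surrounding whitespace with index while-loops and slices the original text, never calling split/strip/find.
import Mathlib
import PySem

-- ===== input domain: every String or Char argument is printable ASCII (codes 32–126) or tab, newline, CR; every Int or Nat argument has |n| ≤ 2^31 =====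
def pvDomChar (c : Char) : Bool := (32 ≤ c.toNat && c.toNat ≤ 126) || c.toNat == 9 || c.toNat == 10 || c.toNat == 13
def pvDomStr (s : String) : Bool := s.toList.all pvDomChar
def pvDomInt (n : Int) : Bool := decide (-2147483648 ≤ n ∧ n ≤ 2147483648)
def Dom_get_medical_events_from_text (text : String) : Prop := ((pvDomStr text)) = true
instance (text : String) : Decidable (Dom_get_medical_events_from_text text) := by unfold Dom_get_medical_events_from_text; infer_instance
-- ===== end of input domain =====

-- B extracts the same events by two staged index passes (collect the raw span of every semicolon-separated
-- segment, then trim each span by index while-loops and slice the original text) instead of A's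
-- split/strip/find fold; objective: alternative.

-- ===== PORT A =====
def get_medical_events_from_text (text : String) : List (Int × Int × String) :=
  -- parts = text.split(';') ; split? is some because the separator ";" is nonempty
  let parts := (PySem.Str.split? text ";").getD []
  (parts.foldl (fun (st : List (Int × Int × String) × Int) part =>
      let part_stripped := PySem.Str.strip part
      if part_stripped ≠ "" then
        let start := PySem.Str.findFrom text part_stripped st.2
        let e := start + PySem.Str.len part_stripped
        (st.1 ++ [(start, e, part_stripped)], e)
      else st) ([], 0)).1

-- ===== PORT B =====
-- while lo < hi and text[lo].isspace(): lo += 1   (text[lo] is always in range here, so the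
-- Option.elim false rendering of the subscript is exact; the structural fuel (hi-lo).toNat
-- bounds the loop and never runs out, it only makes the same computation total)
def pvTrimLoGo (tl : List Char) (hi : Int) : Nat → Int → Int
  | 0, lo => lo
  | n + 1, lo =>
    if lo < hi ∧ ((PySem.List.pyGet? tl lo).elim false PySem.Chars.isspace) = true then
      pvTrimLoGo tl hi n (lo + 1)
    else lo

def pvTrimLo (tl : List Char) (lo hi : Int) : Int :=
  pvTrimLoGo tl hi (hi - lo).toNat lo

-- while hi > lo and text[hi-1].isspace(): hi -= 1
def pvTrimHiGo (tl : List Char) (lo : Int) : Nat → Int → Int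
  | 0, hi => hi
  | n + 1, hi =>
    if lo < hi ∧ ((PySem.List.pyGet? tl (hi - 1)).elim false PySem.Chars.isspace) = true then
      pvTrimHiGo tl lo n (hi - 1)
    else hi

def pvTrimHi (tl : List Char) (lo hi : Int) : Int :=
  pvTrimHiGo tl lo (hi - lo).toNat hi

def get_medical_events_from_text_alt (text : String) : List (Int × Int × String) :=
  -- stage 1: raw spans between semicolons
  let st := (PySem.List.enumerate text.toList).foldl
      (fun (st : List (Int × Int) × Int) p =>
        if p.2 = ';' then (st.1 ++ [(st.2, p.1)], p.1 + 1) else st) ([], 0)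
  let spans := st.1 ++ [(st.2, PySem.Str.len text)]
  -- stage 2: trim each span and keep the non-empty ones
  spans.foldl (fun (ev : List (Int × Int × String)) sp =>
      let lo := pvTrimLo text.toList sp.1 sp.2
      let hi := pvTrimHi text.toList lo sp.2
      if lo < hi then ev ++ [(lo, hi, PySem.Str.slice text (some lo) (some hi))] else ev) []

-- ===== PRECONDITION & SPEC =====
def Spec_get_medical_events_from_text (text : String) (out : List (Int × Int × String)) : Prop := out = get_medical_events_from_text_alt text
instance (text : String) (out : List (Int × Int × String)) : Decidable (Spec_get_medical_events_from_text text out) := by unfold Spec_get_medical_events_from_text; infer_instance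

-- ===== CLAIM (what is proved, stated in full; the proofs are below) =====
def Claim_equal_get_medical_events_from_text : Prop := ∀ (text : String), Dom_get_medical_events_from_text text → Spec_get_medical_events_from_text text (get_medical_events_from_text text)

-- ===== LEMMAS AND PROOFS =====

def mySplit (c : Char) (pre : List Char) : List Char → List (List Char)
  | [] => [pre]
  | x :: xs => if x = c then pre :: mySplit c [] xs else mySplit c (pre ++ [x]) xs

theorem intercalate_cons_cons (sep a b : List Char) (l : List (List Char)) :
    List.intercalate sep (a :: b :: l) = a ++ sep ++ List.intercalate sep (b :: l) := by
  simp [List.intercalate, List.intersperse]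

theorem mySplit_ne_nil (c : Char) : ∀ (l pre : List Char), mySplit c pre l ≠ [] := by
  intro l
  induction l with
  | nil => intro pre; simp [mySplit]
  | cons x xs ih =>
    intro pre
    by_cases h : x = c
    · simp [mySplit, h]
    · simpa [mySplit, h] using ih (pre ++ [x])

theorem mySplit_intercalate (c : Char) :
    ∀ (l pre : List Char), List.intercalate [c] (mySplit c pre l) = pre ++ l := by
  intro l
  induction l with
  | nil => intro pre; simp [mySplit, List.intercalate]
  | cons x xs ih =>
    intro pre
    by_cases h : x = c
    · subst h
      simp only [mySplit, reduceIte]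
      rcases hs : mySplit x [] xs with _ | ⟨a, as⟩
      · exact absurd hs (mySplit_ne_nil x xs [])
      · rw [intercalate_cons_cons]
        have h2 := ih ([] : List Char); rw [hs] at h2
        rw [← hs] at h2 ⊢
        simp [h2]
    · simp only [mySplit, if_neg h]
      rw [ih (pre ++ [x])]; simp

theorem mySplit_free (c : Char) :
    ∀ (l pre : List Char), c ∉ pre → ∀ p ∈ mySplit c pre l, c ∉ p := by
  intro l
  induction l with
  | nil => intro pre hpre p hp; simp [mySplit] at hp; subst hp; exact hpre
  | cons x xs ih =>
    intro pre hpre p hp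
    by_cases h : x = c
    · subst h; simp only [mySplit, reduceIte] at hp
      rcases List.mem_cons.mp hp with rfl | hp
      · exact hpre
      · exact ih [] (by simp) p hp
    · simp only [mySplit, if_neg h] at hp
      refine ih (pre ++ [x]) ?_ p hp
      simp only [List.mem_append, List.mem_singleton]
      rintro (hc | rfl)
      · exact hpre hc
      · exact h rfl

theorem splitOn_go_eq (c : Char) :
    ∀ (fuel : Nat) (l : List Char), l.length < fuel → ∀ (cur : List Char) (acc : List (List Char)),
      PySem.Chars.splitOn.go [c] fuel l cur acc = acc.reverse ++ mySplit c cur.reverse l := by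
  intro fuel
  induction fuel with
  | zero => intro l hl; omega
  | succ f ih =>
    intro l hl cur acc
    match l with
    | [] => simp [PySem.Chars.splitOn.go, mySplit]
    | x :: rest =>
      by_cases h : x = c
      · subst h
        rw [PySem.Chars.splitOn.go]
        simp only [List.isPrefixOf, BEq.rfl, Bool.true_and, if_pos, List.length_cons, List.length_nil]
        rw [show List.drop (0+1) (x :: rest) = rest from rfl]
        rw [ih rest (by simpa using Nat.lt_of_succ_lt_succ hl) [] (cur.reverse :: acc)]
        simp [mySplit]
      · rw [PySem.Chars.splitOn.go]
        have hpf : [c].isPrefixOf (x :: rest) = false := by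
          simp [List.isPrefixOf]; exact fun e => h e.symm
        rw [hpf]
        simp only [Bool.false_eq_true, if_false]
        rw [ih rest (by simpa using Nat.lt_of_succ_lt_succ hl) (x :: cur) acc]
        simp [mySplit, h]

theorem splitOn_eq_mySplit (c : Char) (l : List Char) :
    PySem.Chars.splitOn l [c] = mySplit c [] l := by
  rw [PySem.Chars.splitOn]
  rw [splitOn_go_eq c (l.length + 1) l (by omega) [] []]
  simp

theorem strip_nil_isspace (p : List Char) (h : PySem.Chars.strip p = []) :
    ∀ ch ∈ p, PySem.Chars.isspace ch = true := by
  intro ch hch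
  unfold PySem.Chars.strip PySem.Chars.rstrip PySem.Chars.lstrip at h
  rw [List.reverse_eq_nil_iff, List.dropWhile_eq_nil_iff] at h
  have hall : ∀ x ∈ List.dropWhile PySem.Chars.isspace p, PySem.Chars.isspace x = true := by
    intro x hx
    exact h x (by simpa using hx)
  rcases List.mem_append.mp ((List.takeWhile_append_dropWhile (p := PySem.Chars.isspace) (l := p)) ▸ hch) with h1 | h2
  · exact List.mem_takeWhile_imp h1
  · exact hall ch h2

theorem strip_decomp (p : List Char) (h : PySem.Chars.strip p ≠ []) :
    ∃ lw tw, p = lw ++ PySem.Chars.strip p ++ tw ∧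
      (∀ ch ∈ lw, PySem.Chars.isspace ch = true) ∧
      (∀ ch ∈ tw, PySem.Chars.isspace ch = true) ∧
      PySem.Chars.lstrip p = PySem.Chars.strip p ++ tw ∧
      (∀ ch, (PySem.Chars.strip p).head? = some ch → PySem.Chars.isspace ch = false) := by
  refine ⟨List.takeWhile PySem.Chars.isspace p, (List.takeWhile PySem.Chars.isspace (PySem.Chars.lstrip p).reverse).reverse, ?_, ?_, ?_, ?_, ?_⟩
  · conv_lhs => rw [← List.takeWhile_append_dropWhile (p := PySem.Chars.isspace) (l := p)]
    rw [List.append_assoc]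
    congr 1
    unfold PySem.Chars.strip PySem.Chars.rstrip PySem.Chars.lstrip
    conv_lhs => rw [← List.reverse_reverse (List.dropWhile PySem.Chars.isspace p)]
    rw [← List.reverse_append, List.takeWhile_append_dropWhile]
  · intro ch hch; exact List.mem_takeWhile_imp hch
  · intro ch hch; exact List.mem_takeWhile_imp (by simpa using hch)
  · unfold PySem.Chars.strip PySem.Chars.rstrip
    rw [← List.reverse_append, List.takeWhile_append_dropWhile, List.reverse_reverse]
  · intro ch hch
    have hL : PySem.Chars.lstrip p = PySem.Chars.strip p ++ (List.takeWhile PySem.Chars.isspace (PySem.Chars.lstrip p).reverse).reverse := by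
      unfold PySem.Chars.strip PySem.Chars.rstrip
      rw [← List.reverse_append, List.takeWhile_append_dropWhile, List.reverse_reverse]
    have hh : (PySem.Chars.lstrip p).head? = some ch := by
      rw [hL, List.head?_append_of_ne_nil _ h] at *
      exact hch
    unfold PySem.Chars.lstrip at hh
    have := List.head?_dropWhile_not PySem.Chars.isspace p
    rw [hh] at this
    simpa using this

theorem infix_of_prefix_drop {sub l : List Char} (m : Nat) (h : sub <+: l.drop m) : sub <:+: l := by
  rcases h with ⟨r, hr⟩
  exact ⟨l.take m, r, by rw [List.append_assoc, hr, List.take_append_drop]⟩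

theorem findFrom_eq_of (tl sub : List Char) (cp k : Nat) (hcp : cp ≤ tl.length)
    (hck : cp ≤ k) (hpre : sub <+: tl.drop k)
    (hnone : ∀ j, cp ≤ j → j < k → ¬ sub <+: tl.drop j) :
    PySem.Chars.findFrom tl sub (cp : Int) = (k : Int) := by
  have hne : PySem.Chars.findFrom tl sub (cp : Int) ≠ -1 := by
    rw [Ne, PySem.Chars.findFrom_natCast_eq_neg_one_iff tl sub cp hcp, not_not]
    have : sub <+: (tl.drop cp).drop (k - cp) := by
      rwa [List.drop_drop, Nat.add_sub_cancel' hck]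
    exact infix_of_prefix_drop (k - cp) this
  obtain ⟨h1, h2, h3⟩ := PySem.Chars.findFrom_natCast_spec tl sub cp hcp hne
  set r := PySem.Chars.findFrom tl sub (cp : Int) with hr
  have hr0 : 0 ≤ r := le_trans (by exact_mod_cast Int.natCast_nonneg cp) h1
  have hrk : r.toNat = k := by
    by_contra hne2
    rcases Nat.lt_or_ge r.toNat k with hlt | hge
    · exact hnone r.toNat (by omega) hlt h2
    · exact h3 k hck (by omega) hpre
  omega

def stepA (tl : List Char) (st : List (Int × Int × String) × Int) (p : List Char) :
    List (Int × Int × String) × Int :=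
  let s := PySem.Chars.strip p
  if s ≠ [] then
    let start := PySem.Chars.findFrom tl s st.2
    (st.1 ++ [(start, start + s.length, String.ofList s)], start + s.length)
  else st

theorem parts_eq (text : String) :
    (PySem.Str.split? text ";").getD [] = (PySem.Chars.splitOn text.toList [';']).map String.ofList := by
  simp [PySem.Str.split?, PySem.Chars.split?]

theorem portA_eq (text : String) :
    get_medical_events_from_text text =
      ((PySem.Chars.splitOn text.toList [';']).foldl (stepA text.toList) ([], 0)).1 := by
  unfold get_medical_events_from_text
  simp only []
  rw [parts_eq, List.foldl_map]
  congr 1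
  apply PySem.List.foldl_congr_mem
  intro st p _
  simp [stepA, PySem.Str.strip, PySem.Str.findFrom, PySem.Str.len, String.toList_ofList,
    ← String.toList_inj]

-- the offset-based one-pass fold both ports are reduced to
def stepB (st : List (Int × Int × String) × Int) (p : List Char) :
    List (Int × Int × String) × Int :=
  let s := PySem.Chars.strip p
  (if s ≠ [] then
     let start := st.2 + ((p.length : Int) - ((PySem.Chars.lstrip p).length : Int))
     st.1 ++ [(start, start + s.length, String.ofList s)]
   else st.1,
   st.2 + p.length + 1)

theorem main_loop (tl : List Char) (parts : List (List Char)) :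
    ∀ (offset cp : Nat) (ev : List (Int × Int × String)),
      (∀ p ∈ parts, ';' ∉ p) →
      tl.drop offset = List.intercalate [';'] parts →
      offset ≤ tl.length →
      cp ≤ offset →
      (∀ j ch, cp ≤ j → j < offset → tl[j]? = some ch →
        (PySem.Chars.isspace ch = true ∨ ch = ';')) →
      (parts.foldl (stepA tl) (ev, (cp : Int))).1 = (parts.foldl stepB (ev, (offset : Int))).1 := by
  induction parts with
  | nil => intro offset cp ev _ _ _ _ _; rfl
  | cons p rest ih =>
    intro offset cp ev hfree hdrop hoff hcpo hreg
    set tail : List Char := if rest = [] then [] else ';' :: List.intercalate [';'] rest with htail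
    have hploc : tl.drop offset = p ++ tail := by
      rcases rest with _ | ⟨q, qs⟩
      · simpa [List.intercalate, htail] using hdrop
      · rw [htail, if_neg (by simp)]
        rw [hdrop, intercalate_cons_cons]
        simp
    have hlen : tl.length = offset + p.length + tail.length := by
      have h1 := congrArg List.length hploc
      rw [List.length_drop, List.length_append] at h1
      omega
    have hidx : ∀ j, offset ≤ j → tl[j]? = (p ++ tail)[j - offset]? := by
      intro j hj
      rw [← hploc, List.getElem?_drop]
      congr 1
      omega
    have hdrop' : rest ≠ [] → tl.drop (offset + p.length + 1) = List.intercalate [';'] rest := by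
      intro hrest
      have h2 : tl.drop (offset + p.length + 1) = (tl.drop offset).drop (p.length + 1) := by
        rw [List.drop_drop, Nat.add_assoc]
      rw [h2, hploc, htail, if_neg hrest]
      rw [show p ++ ';' :: List.intercalate [';'] rest = (p ++ [';']) ++ List.intercalate [';'] rest by simp]
      rw [show p.length + 1 = (p ++ [';']).length by simp]
      exact List.drop_left
    have hoff' : rest ≠ [] → offset + p.length + 1 ≤ tl.length := by
      intro hrest
      rw [htail, if_neg hrest] at hlen
      simp at hlen
      omega
    have hsemi : rest ≠ [] → tl[offset + p.length]? = some ';' := by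
      intro hrest
      rw [hidx _ (by omega), Nat.add_sub_cancel_left,
        List.getElem?_append_right (le_refl _), Nat.sub_self, htail, if_neg hrest]
      rfl
    have hpchar : ∀ i, i < p.length → tl[offset + i]? = p[i]? := by
      intro i hi
      rw [hidx _ (by omega), Nat.add_sub_cancel_left, List.getElem?_append_left hi]
    by_cases hs : PySem.Chars.strip p = []
    · -- whitespace-only part: both sides skip it
      have hA : stepA tl (ev, ((cp : Nat) : Int)) p = (ev, ((cp : Nat) : Int)) := by
        simp [stepA, hs]
      have hB : stepB (ev, ((offset : Nat) : Int)) p = (ev, ((offset : Int) + p.length + 1)) := by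
        simp [stepB, hs]
      rcases rest with _ | ⟨q, qs⟩
      · simp [List.foldl, hA, hB]
      · rw [show List.foldl (stepA tl) (ev, ((cp:Nat):Int)) (p :: q :: qs) = List.foldl (stepA tl) (stepA tl (ev, ((cp:Nat):Int)) p) (q::qs) from rfl,
            show List.foldl stepB (ev, ((offset:Nat):Int)) (p :: q :: qs) = List.foldl stepB (stepB (ev, ((offset:Nat):Int)) p) (q::qs) from rfl,
            hA, hB]
        rw [show ((offset : Int) + p.length + 1) = ((offset + p.length + 1 : Nat) : Int) by push_cast; ring]
        apply ih (offset + p.length + 1) cp ev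
        · intro x hx; exact hfree x (List.mem_cons_of_mem p hx)
        · exact hdrop' (by simp)
        · exact hoff' (by simp)
        · omega
        · intro j ch hcj hjo hget
          by_cases hjo2 : j < offset
          · exact hreg j ch hcj hjo2 hget
          · by_cases hjp : j - offset < p.length
            · left
              rw [show j = offset + (j - offset) by omega, hpchar _ hjp] at hget
              exact strip_nil_isspace p hs ch (List.mem_of_getElem? hget)
            · have hje : j = offset + p.length := by omega
              rw [hje, hsemi (by simp)] at hget
              right
              exact (Option.some_inj.mp hget).symm
    · -- part with content
      obtain ⟨lw, tw, hp, hlw, htw, hlstrip, hhead⟩ := strip_decomp p hs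
      set s := PySem.Chars.strip p with hsdef
      obtain ⟨c0, s', hs0⟩ : ∃ c0 s', s = c0 :: s' := by
        rcases s with _ | ⟨c0, s'⟩
        · exact absurd rfl hs
        · exact ⟨c0, s', rfl⟩
      have hc0head : s.head? = some c0 := by rw [hs0]; rfl
      have hc0sp : PySem.Chars.isspace c0 = false := hhead c0 hc0head
      have hc0mem : c0 ∈ p := by
        rw [hp]; rw [hs0]; simp
      have hc0semi : c0 ≠ ';' := by
        intro he; exact hfree p (by simp) (he ▸ hc0mem)
      have hplen : p.length = lw.length + s.length + tw.length := by
        rw [hp]; simp; omega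
      -- position of the stripped part
      have hk : PySem.Chars.findFrom tl s ((cp : Nat) : Int) = ((offset + lw.length : Nat) : Int) := by
        apply findFrom_eq_of tl s cp (offset + lw.length) (by omega) (by omega)
        · have h2 : tl.drop (offset + lw.length) = (s ++ tw) ++ tail := by
            rw [← List.drop_drop, hploc, hp]
            rw [show lw ++ s ++ tw ++ tail = lw ++ ((s ++ tw) ++ tail) by simp]
            rw [show lw.length = lw.length from rfl]
            conv_lhs => rw [show (lw ++ ((s ++ tw) ++ tail)) = lw ++ ((s ++ tw) ++ tail) from rfl]
            exact List.drop_left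
          rw [h2, List.append_assoc]
          exact ⟨tw ++ tail, rfl⟩
        · intro j hcj hjk hprefix
          have hget : tl[j]? = some c0 := by
            rcases hprefix with ⟨r, hr⟩
            have : (tl.drop j).head? = some c0 := by
              rw [← hr, hs0]; rfl
            rwa [List.head?_eq_getElem?, List.getElem?_drop, Nat.add_zero] at this
          by_cases hjo2 : j < offset
          · rcases hreg j c0 hcj hjo2 hget with hsp | hsemi2
            · rw [hc0sp] at hsp; exact Bool.false_ne_true hsp
            · exact hc0semi hsemi2
          · have hjl : j - offset < lw.length := by omega
            rw [show j = offset + (j - offset) by omega, hpchar _ (by omega)] at hget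
            rw [hp, List.append_assoc, List.getElem?_append_left hjl] at hget
            have := hlw c0 (List.mem_of_getElem? hget)
            rw [hc0sp] at this; exact Bool.false_ne_true this
      -- the two steps produce the same event and corresponding positions
      have hleadB : ((p.length : Int) - ((PySem.Chars.lstrip p).length : Int)) = (lw.length : Int) := by
        rw [hlstrip]
        simp only [hplen, List.length_append]
        push_cast
        ring
      have hstart : PySem.Chars.findFrom tl s ((cp : Nat) : Int) = (offset : Int) + lw.length := by
        rw [hk]; push_cast
        try ring
      have hA : stepA tl (ev, ((cp : Nat) : Int)) p =
          (ev ++ [((offset : Int) + lw.length, (offset : Int) + lw.length + s.length, String.ofList s)],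
           (offset : Int) + lw.length + s.length) := by
        simp [stepA, ← hsdef, hs, hstart, add_assoc]
      have hB : stepB (ev, ((offset : Nat) : Int)) p =
          (ev ++ [((offset : Int) + lw.length, (offset : Int) + lw.length + s.length, String.ofList s)],
           (offset : Int) + p.length + 1) := by
        simp [stepB, ← hsdef, hs, hleadB, add_assoc]
      rcases rest with _ | ⟨q, qs⟩
      · simp [List.foldl, hA, hB]
      · rw [show List.foldl (stepA tl) (ev, ((cp:Nat):Int)) (p :: q :: qs) = List.foldl (stepA tl) (stepA tl (ev, ((cp:Nat):Int)) p) (q::qs) from rfl,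
            show List.foldl stepB (ev, ((offset:Nat):Int)) (p :: q :: qs) = List.foldl stepB (stepB (ev, ((offset:Nat):Int)) p) (q::qs) from rfl,
            hA, hB]
        rw [show (offset : Int) + lw.length + s.length = ((offset + lw.length + s.length : Nat) : Int) by push_cast; ring,
            show ((offset : Int) + p.length + 1) = ((offset + p.length + 1 : Nat) : Int) by push_cast; ring]
        apply ih (offset + p.length + 1) (offset + lw.length + s.length) _
        · intro x hx; exact hfree x (List.mem_cons_of_mem p hx)
        · exact hdrop' (by simp)
        · exact hoff' (by simp)
        · omega
        · intro j ch hcj hjo hget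
          by_cases hjp : j - offset < p.length
          · left
            rw [show j = offset + (j - offset) by omega, hpchar _ hjp] at hget
            rw [hp] at hget
            rw [List.getElem?_append_right (by simp; omega)] at hget
            exact htw ch (List.mem_of_getElem? hget)
          · have hje : j = offset + p.length := by omega
            rw [hje, hsemi (by simp)] at hget
            right
            exact (Option.some_inj.mp hget).symm

-- ===== B-side reduction: stage 1 produces the spans of the split parts =====

def step1 (st : List (Int × Int) × Int) (p : Int × Char) : List (Int × Int) × Int :=
  if p.2 = ';' then (st.1 ++ [(st.2, p.1)], p.1 + 1) else st

def spansOf : Nat → List (List Char) → List (Int × Int)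
  | _, [] => []
  | off, p :: ps => ((off : Int), ((off + p.length : Nat) : Int)) :: spansOf (off + p.length + 1) ps

theorem stage1_eq : ∀ (l pre : List Char) (lo : Nat) (acc : List (Int × Int)),
    ((PySem.List.enumerate l ((lo + pre.length : Nat) : Int)).foldl step1 (acc, (lo : Int))).1
      ++ [(((PySem.List.enumerate l ((lo + pre.length : Nat) : Int)).foldl step1 (acc, (lo : Int))).2,
           ((lo + pre.length + l.length : Nat) : Int))]
    = acc ++ spansOf lo (mySplit ';' pre l) := by
  intro l
  induction l with
  | nil =>
    intro pre lo acc
    simp [PySem.List.enumerate_nil, mySplit, spansOf]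
  | cons x xs ih =>
    intro pre lo acc
    rw [PySem.List.enumerate_cons]
    by_cases h : x = ';'
    · subst h
      rw [List.foldl_cons]
      have hstep : step1 (acc, (lo : Int)) (((lo + pre.length : Nat) : Int), ';') =
          (acc ++ [((lo : Int), ((lo + pre.length : Nat) : Int))], ((lo + pre.length : Nat) : Int) + 1) := by
        simp [step1]
      rw [hstep]
      rw [show ((lo + pre.length : Nat) : Int) + 1 = ((lo + pre.length + 1 : Nat) : Int) by push_cast; ring]
      rw [show lo + pre.length + (';' :: xs).length = (lo + pre.length + 1) + xs.length by simp; omega]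
      have := ih [] (lo + pre.length + 1) (acc ++ [((lo : Int), ((lo + pre.length : Nat) : Int))])
      simp only [List.length_nil, Nat.add_zero] at this
      rw [this]
      simp [mySplit, spansOf]
    · rw [List.foldl_cons]
      have hstep : step1 (acc, (lo : Int)) (((lo + pre.length : Nat) : Int), x) = (acc, (lo : Int)) := by
        simp [step1, h]
      rw [hstep]
      have hcast : ((lo + pre.length : Nat) : Int) + 1 = ((lo + (pre ++ [x]).length : Nat) : Int) := by
        push_cast; simp; ring
      rw [hcast]
      have := ih (pre ++ [x]) lo acc
      rw [show (lo + (pre ++ [x]).length + xs.length) = (lo + pre.length + (x :: xs).length) by simp; omega] at this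
      rw [this]
      simp [mySplit, h]

theorem trimLo_eq (tl : List Char) : ∀ (q : List Char) (lo : Nat),
    (∀ i, i < q.length → tl[lo + i]? = q[i]?) →
    pvTrimLo tl (lo : Int) ((lo + q.length : Nat) : Int) =
      ((lo + (q.takeWhile PySem.Chars.isspace).length : Nat) : Int) := by
  have go : ∀ (q : List Char) (lo : Nat),
      (∀ i, i < q.length → tl[lo + i]? = q[i]?) →
      pvTrimLoGo tl ((lo + q.length : Nat) : Int) q.length (lo : Int) =
        ((lo + (q.takeWhile PySem.Chars.isspace).length : Nat) : Int) := by
    intro q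
    induction q with
    | nil => intro lo _; simp [pvTrimLoGo]
    | cons a q' ih =>
      intro lo hq
      have hget : PySem.List.pyGet? tl ((lo : Nat) : Int) = some a := by
        rw [PySem.List.pyGet?_natCast]
        have := hq 0 (by simp)
        simpa using this
      show (if ((lo : Nat) : Int) < ((lo + (a :: q').length : Nat) : Int) ∧
            ((PySem.List.pyGet? tl ((lo : Nat) : Int)).elim false PySem.Chars.isspace) = true then
          pvTrimLoGo tl ((lo + (a :: q').length : Nat) : Int) q'.length (((lo : Nat) : Int) + 1)
        else ((lo : Nat) : Int)) = _
      by_cases hsp : PySem.Chars.isspace a = true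
      · rw [if_pos ⟨by exact_mod_cast Nat.lt_add_of_pos_right (by simp), by rw [hget]; exact hsp⟩]
        rw [show ((lo : Nat) : Int) + 1 = (((lo + 1) : Nat) : Int) by push_cast; ring,
          show ((lo + (a :: q').length : Nat) : Int) = (((lo + 1) + q'.length : Nat) : Int) by
            push_cast; simp; ring]
        rw [ih (lo + 1) (fun i hi => by
          have := hq (i + 1) (by simpa using Nat.succ_lt_succ hi)
          rw [show lo + 1 + i = lo + (i + 1) by omega]
          simpa using this)]
        simp [hsp]
        omega
      · rw [if_neg (by
          rintro ⟨-, h2⟩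
          rw [hget] at h2
          exact hsp h2)]
        simp [hsp]
  intro q lo hq
  unfold pvTrimLo
  rw [show ((lo + q.length : Nat) : Int) - ((lo : Nat) : Int) = ((q.length : Nat) : Int) by
    push_cast; ring]
  rw [Int.toNat_natCast]
  exact go q lo hq

theorem trimHi_eq (tl : List Char) : ∀ (q : List Char) (lo : Nat),
    (∀ i, i < q.length → tl[lo + i]? = q[i]?) →
    pvTrimHi tl (lo : Int) ((lo + q.length : Nat) : Int) =
      ((lo + (PySem.Chars.rstrip q).length : Nat) : Int) := by
  have go : ∀ (q : List Char) (lo : Nat),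
      (∀ i, i < q.length → tl[lo + i]? = q[i]?) →
      pvTrimHiGo tl (lo : Int) q.length ((lo + q.length : Nat) : Int) =
        ((lo + (PySem.Chars.rstrip q).length : Nat) : Int) := by
    intro q
    induction q using List.reverseRecOn with
    | nil => intro lo _; simp [pvTrimHiGo, PySem.Chars.rstrip]
    | append_singleton q' a ih =>
      intro lo hq
      have hget : PySem.List.pyGet? tl (((lo + (q'.length + 1) : Nat) : Int) - 1) = some a := by
        have hc : ((lo + (q'.length + 1) : Nat) : Int) - 1 = ((lo + q'.length : Nat) : Int) := by
          push_cast; ring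
        rw [hc, PySem.List.pyGet?_natCast]
        have := hq q'.length (by simp)
        rw [this, List.getElem?_append_right (le_refl _)]
        simp
      simp only [List.length_append, List.length_cons, List.length_nil, Nat.zero_add]
      show (if ((lo : Nat) : Int) < ((lo + (q'.length + 1) : Nat) : Int) ∧
            ((PySem.List.pyGet? tl (((lo + (q'.length + 1) : Nat) : Int) - 1)).elim false PySem.Chars.isspace) = true then
          pvTrimHiGo tl ((lo : Nat) : Int) q'.length (((lo + (q'.length + 1) : Nat) : Int) - 1)
        else ((lo + (q'.length + 1) : Nat) : Int)) = _
      by_cases hsp : PySem.Chars.isspace a = true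
      · rw [if_pos ⟨by exact_mod_cast Nat.lt_add_of_pos_right (by simp), by rw [hget]; exact hsp⟩]
        have hc : ((lo + (q'.length + 1) : Nat) : Int) - 1 = ((lo + q'.length : Nat) : Int) := by
          push_cast; ring
        rw [hc]
        rw [ih lo (fun i hi => (hq i (by simp; omega)).trans (List.getElem?_append_left hi))]
        have hrs : PySem.Chars.rstrip (q' ++ [a]) = PySem.Chars.rstrip q' := by
          unfold PySem.Chars.rstrip
          rw [List.reverse_append]
          simp [hsp]
        rw [hrs]
      · rw [if_neg (by
          rintro ⟨-, h2⟩
          rw [hget] at h2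
          exact hsp h2)]
        have hrs : PySem.Chars.rstrip (q' ++ [a]) = q' ++ [a] := by
          unfold PySem.Chars.rstrip
          rw [List.reverse_append]
          simp [hsp]
        rw [hrs]
        simp
  intro q lo hq
  unfold pvTrimHi
  rw [show ((lo + q.length : Nat) : Int) - ((lo : Nat) : Int) = ((q.length : Nat) : Int) by
    push_cast; ring]
  rw [Int.toNat_natCast]
  exact go q lo hq

def step2 (tl : List Char) (ev : List (Int × Int × String)) (sp : Int × Int) :
    List (Int × Int × String) :=
  let lo := pvTrimLo tl sp.1 sp.2
  let hi := pvTrimHi tl lo sp.2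
  if lo < hi then ev ++ [(lo, hi, String.ofList (PySem.List.slice tl (some lo) (some hi)))] else ev

theorem stage2_eq (tl : List Char) : ∀ (parts : List (List Char)) (lo : Nat) (ev : List (Int × Int × String)),
    tl.drop lo = List.intercalate [';'] parts →
    (spansOf lo parts).foldl (step2 tl) ev = (parts.foldl stepB (ev, (lo : Int))).1 := by
  intro parts
  induction parts with
  | nil => intro lo ev _; rfl
  | cons p rest ih =>
    intro lo ev hdrop
    set tail : List Char := if rest = [] then [] else ';' :: List.intercalate [';'] rest with htail
    have hploc : tl.drop lo = p ++ tail := by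
      rcases rest with _ | ⟨q, qs⟩
      · simpa [List.intercalate, htail] using hdrop
      · rw [htail, if_neg (by simp)]
        rw [hdrop, intercalate_cons_cons]
        simp
    have hpchar : ∀ i, i < p.length → tl[lo + i]? = p[i]? := by
      intro i hi
      rw [← List.getElem?_drop, hploc, List.getElem?_append_left hi]
    have hdrop' : rest ≠ [] → tl.drop (lo + p.length + 1) = List.intercalate [';'] rest := by
      intro hrest
      have h2 : tl.drop (lo + p.length + 1) = (tl.drop lo).drop (p.length + 1) := by
        rw [List.drop_drop, Nat.add_assoc]
      rw [h2, hploc, htail, if_neg hrest]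
      rw [show p ++ ';' :: List.intercalate [';'] rest = (p ++ [';']) ++ List.intercalate [';'] rest by simp]
      rw [show p.length + 1 = (p ++ [';']).length by simp]
      exact List.drop_left
    -- evaluate the trims on the span of p
    have hlead := trimLo_eq tl p lo (fun i hi => hpchar i hi)
    set lead := (p.takeWhile PySem.Chars.isspace).length with hleaddef
    have hsplitp : p.takeWhile PySem.Chars.isspace ++ p.dropWhile PySem.Chars.isspace = p :=
      List.takeWhile_append_dropWhile
    have hlead_le : lead ≤ p.length := by
      have := congrArg List.length hsplitp
      simp only [List.length_append] at this
      omega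
    have hdropw : p.drop lead = PySem.Chars.lstrip p := by
      have h1 : (p.takeWhile PySem.Chars.isspace ++ p.dropWhile PySem.Chars.isspace).drop lead
          = p.dropWhile PySem.Chars.isspace := by
        rw [hleaddef]; exact List.drop_left
      rw [hsplitp] at h1
      rw [h1]
      rfl
    have hlenls : (PySem.Chars.lstrip p).length = p.length - lead := by
      rw [← hdropw, List.length_drop]
    have hstrip : PySem.Chars.strip p = PySem.Chars.rstrip (PySem.Chars.lstrip p) := rfl
    have hq2 : ∀ i, i < (PySem.Chars.lstrip p).length → tl[(lo + lead) + i]? = (PySem.Chars.lstrip p)[i]? := by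
      intro i hi
      rw [← hdropw, List.getElem?_drop, show lo + lead + i = lo + (lead + i) from by omega]
      exact hpchar (lead + i) (by rw [hlenls] at hi; omega)
    have hhi := trimHi_eq tl (PySem.Chars.lstrip p) (lo + lead) hq2
    have hcasthi : ((lo + p.length : Nat) : Int) = (((lo + lead) + (PySem.Chars.lstrip p).length : Nat) : Int) := by
      push_cast; rw [hlenls]; push_cast [hlead_le]; ring
    have hstep2 : step2 tl ev ((lo : Int), ((lo + p.length : Nat) : Int)) = (stepB (ev, (lo : Int)) p).1 := by
      simp only [step2, stepB]
      rw [hlead, hcasthi, hhi, ← hstrip]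
      by_cases hs : PySem.Chars.strip p = []
      · rw [hs]
        simp
      · obtain ⟨lw, tw, hp, hlw, htw, hlstrip, hhead⟩ := strip_decomp p hs
        have hposlen : 0 < (PySem.Chars.strip p).length := List.length_pos_of_ne_nil hs
        have hlt : ((lo + lead : Nat) : Int) < ((lo + lead + (PySem.Chars.strip p).length : Nat) : Int) := by
          exact_mod_cast Nat.lt_add_of_pos_right hposlen
        rw [if_pos hlt, if_pos hs]
        have hslice : PySem.List.slice tl (some ((lo + lead : Nat) : Int))
            (some (((lo + lead) + (PySem.Chars.strip p).length : Nat) : Int))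
            = PySem.Chars.strip p := by
          rw [PySem.List.slice_natCast]
          rw [show (lo + lead) + (PySem.Chars.strip p).length - (lo + lead) = (PySem.Chars.strip p).length by omega]
          have hd : tl.drop (lo + lead) = PySem.Chars.lstrip p ++ tail := by
            rw [← List.drop_drop, hploc, ← hdropw]
            have : lead ≤ (p ++ tail).length := by simp; omega
            rw [List.drop_append_of_le_length hlead_le]
          rw [hd, hlstrip, List.append_assoc, List.take_left]
        rw [hslice]
        have hstartB : ((lo : Int)) + ((p.length : Int) - ((PySem.Chars.lstrip p).length : Int))
            = (((lo + lead) : Nat) : Int) := by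
          rw [hlenls]; push_cast [hlead_le]; ring
        rw [← hstartB]
        have hendB : ((((lo + lead) + (PySem.Chars.strip p).length : Nat)) : Int)
            = ((lo : Int) + ((p.length : Int) - ((PySem.Chars.lstrip p).length : Int))) + ((PySem.Chars.strip p).length : Int) := by
          rw [hlenls]; push_cast [hlead_le]; ring
        rw [hendB]
    have hsnd : (stepB (ev, (lo : Int)) p).2 = ((lo + p.length + 1 : Nat) : Int) := by
      unfold stepB; push_cast; ring
    rcases rest with _ | ⟨q, qs⟩
    · show List.foldl (step2 tl) (step2 tl ev ((lo : Int), ((lo + p.length : Nat) : Int))) []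
          = (List.foldl stepB (stepB (ev, (lo : Int)) p) []).1
      simpa using hstep2
    · show List.foldl (step2 tl) (step2 tl ev ((lo : Int), ((lo + p.length : Nat) : Int)))
            (spansOf (lo + p.length + 1) (q :: qs))
          = (List.foldl stepB (stepB (ev, (lo : Int)) p) (q :: qs)).1
      rw [hstep2]
      rw [show stepB (ev, (lo : Int)) p = ((stepB (ev, (lo : Int)) p).1, ((lo + p.length + 1 : Nat) : Int)) by
        rw [← hsnd]]
      exact ih (lo + p.length + 1) _ (hdrop' (by simp))

theorem portB_eq (text : String) :
    get_medical_events_from_text_alt text =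
      ((PySem.Chars.splitOn text.toList [';']).foldl stepB ([], 0)).1 := by
  unfold get_medical_events_from_text_alt
  simp only []
  have h1 := stage1_eq text.toList [] 0 []
  simp only [List.length_nil, Nat.add_zero, Nat.zero_add, List.nil_append, Nat.cast_zero] at h1
  have h2 : ∀ spans : List (Int × Int),
      spans.foldl (fun (ev : List (Int × Int × String)) sp =>
        let lo := pvTrimLo text.toList sp.1 sp.2
        let hi := pvTrimHi text.toList lo sp.2
        if lo < hi then ev ++ [(lo, hi, PySem.Str.slice text (some lo) (some hi))] else ev) []
      = spans.foldl (step2 text.toList) [] := by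
    intro spans
    apply PySem.List.foldl_congr_mem
    intro ev sp _
    have hsl : ∀ a b, PySem.Str.slice text a b = String.ofList (PySem.List.slice text.toList a b) := by
      intro a b
      rw [← String.toList_inj, PySem.Str.toList_slice, PySem.Chars.slice_eq_listSlice,
        String.toList_ofList]
    simp only [hsl]
    rfl
  rw [show ((PySem.List.enumerate text.toList 0).foldl
        (fun (st : List (Int × Int) × Int) p => if p.2 = ';' then (st.1 ++ [(st.2, p.1)], p.1 + 1) else st)
        ([], 0)) = ((PySem.List.enumerate text.toList 0).foldl step1 ([], 0)) from rfl]
  rw [h2]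
  rw [show PySem.Str.len text = ((text.toList.length : Nat) : Int) by
    simp [PySem.Str.len]]
  rw [h1, splitOn_eq_mySplit]
  apply stage2_eq
  simpa using (mySplit_intercalate ';' text.toList []).symm

-- ===== VERDICT (by name: the statement is the Claim_ definition above) =====
theorem get_medical_events_from_text_spec : Claim_equal_get_medical_events_from_text := by
  intro text _
  unfold Spec_get_medical_events_from_text
  rw [portA_eq, portB_eq, splitOn_eq_mySplit]
  refine main_loop text.toList _ 0 0 [] ?_ ?_ (Nat.zero_le _) (le_refl 0) (fun j ch h1 h2 _ => by omega)
  · exact mySplit_free ';' text.toList [] (by simp)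
  · simpa using (mySplit_intercalate ';' text.toList []).symm
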